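-- pv_equiv track=rewrite | github.com/EtherealCipherMaven/srt-gen | streamlit.py | split_sentence_by_length
-- ===== SOURCE A (Python) =====
-- def split_sentence_by_length(sentence, max_length=400, flex_length=5, avoid_ending_words=None):
--     if avoid_ending_words is None:
--         avoid_ending_words = {'the', 'a', 'an', 'for', 'by', 'and', 'in', 'on', 'at', 'to', 'of', 'as'}
--
--     words = sentence.split()
--
--     if len(words) <= max_length + flex_length:
--         return [sentence]
--
--     def find_split_point(words):
--         mid_point = len(words) // 2
--
--         while mid_point > 0 and words[mid_point - 1].lower() in avoid_ending_words:
--             mid_point -= 1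
--
--         if mid_point == 0 or mid_point == len(words):
--             mid_point = len(words) // 2
--
--         return mid_point
--
--     split_index = find_split_point(words)
--
--     first_half = ' '.join(words[:split_index])
--     second_half = ' '.join(words[split_index:])
--
--     if len(second_half.split()) > max_length:
--         second_half_parts = split_sentence_by_length(second_half, max_length, flex_length, avoid_ending_words)
--         return [first_half] + second_half_parts
--     else:
--         return [first_half, second_half]
-- ===== SOURCE B (Python) =====
-- def find_split_point(words, avoid_ending_words):
--     mid_point = len(words) // 2
--     while mid_point > 0 and words[mid_point - 1].lower() in avoid_ending_words:
--         mid_point -= 1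
--     if mid_point == 0 or mid_point == len(words):
--         mid_point = len(words) // 2
--     return mid_point
--
--
-- def split_sentence_by_length(sentence, max_length=400, flex_length=5, avoid_ending_words=None):
--     if avoid_ending_words is None:
--         avoid_ending_words = {'the', 'a', 'an', 'for', 'by', 'and', 'in', 'on', 'at', 'to', 'of', 'as'}
--     words = sentence.split()
--     if len(words) <= max_length + flex_length:
--         return [sentence]
--     stop = max(max_length, max_length + flex_length)
--     chunks = []
--     while True:
--         i = find_split_point(words, avoid_ending_words)
--         chunks.append(' '.join(words[:i]))
--         words = words[i:]
--         if len(words) <= stop: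
--             break
--     chunks.append(' '.join(words))
--     return chunks
-- ===== Notes on version B (the rewrite author's own statement) =====
-- stated objective: alternative
-- what changed: Replaces A's tail recursion, which re-joins and re-splits the remainder string at every level, with a single iterative loop over the word list that emits chunks left-to-right; the loop's stop threshold max(max_length, max_length+flex_length) captures A's two-level stop rule in one condition.
import Mathlib
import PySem

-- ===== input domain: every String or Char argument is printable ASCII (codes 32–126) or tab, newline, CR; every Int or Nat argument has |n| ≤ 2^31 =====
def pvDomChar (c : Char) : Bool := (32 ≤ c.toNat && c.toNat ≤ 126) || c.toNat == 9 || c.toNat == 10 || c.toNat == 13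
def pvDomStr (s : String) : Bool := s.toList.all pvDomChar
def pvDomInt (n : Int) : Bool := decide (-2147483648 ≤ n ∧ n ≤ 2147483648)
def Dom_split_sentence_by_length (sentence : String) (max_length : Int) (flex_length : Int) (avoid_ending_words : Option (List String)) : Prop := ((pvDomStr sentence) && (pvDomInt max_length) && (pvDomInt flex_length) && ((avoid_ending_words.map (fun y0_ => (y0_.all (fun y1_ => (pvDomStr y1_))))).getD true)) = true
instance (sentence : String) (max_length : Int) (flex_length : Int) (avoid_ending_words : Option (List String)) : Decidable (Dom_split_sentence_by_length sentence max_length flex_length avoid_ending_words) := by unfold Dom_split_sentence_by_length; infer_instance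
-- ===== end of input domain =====

-- B replaces A's recursion (which re-joins and re-splits the remainder each level) by one
-- iterative chunk-emitting loop over the word list; alternative decomposition, no speed claim.

-- ===== PORT A =====
def pvAvoidDefault : List String :=
  ["the", "a", "an", "for", "by", "and", "in", "on", "at", "to", "of", "as"]

-- the inner helper find_split_point (identical source text in A and in B): the while loop …
def pvFspGo (ws avoid : List String) : Nat → Nat
  | 0 => 0
  | m + 1 => if avoid.contains (PySem.Str.lower (ws.getD m "")) then pvFspGo ws avoid m else m + 1

-- … and its wrapper (mid_point = len(words)//2; while …; if mid==0 or mid==len: mid = len//2)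
def pvFindSplitPoint (ws avoid : List String) : Nat :=
  let mid := pvFspGo ws avoid (ws.length / 2)
  if mid = 0 ∨ mid = ws.length then ws.length / 2 else mid

-- A's recursion, fuel-indexed (fuel = word count + 1 is enough under Pre_; A diverges outside it)
def splitA_go (avoid : List String) (max_length flex_length : Int) : Nat → String → List String
  | 0, s => [s]
  | fuel + 1, s =>
    let words := PySem.Str.split₀ s
    if (words.length : Int) ≤ max_length + flex_length then [s]
    else
      let split_index := pvFindSplitPoint words avoid
      let first_half := PySem.Str.join " " (words.take split_index)
      let second_half := PySem.Str.join " " (words.drop split_index)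
      if max_length < ((PySem.Str.split₀ second_half).length : Int) then
        first_half :: splitA_go avoid max_length flex_length fuel second_half
      else [first_half, second_half]

def split_sentence_by_length (sentence : String) (max_length : Int) (flex_length : Int) (avoid_ending_words : Option (List String)) : List String :=
  let avoid := avoid_ending_words.getD pvAvoidDefault
  splitA_go avoid max_length flex_length ((PySem.Str.split₀ sentence).length + 1) sentence

-- ===== PORT B =====
-- B's while-True loop: append the chunk, cut the words, break once the rest is short enough
def splitB_go (avoid : List String) (stop : Int) : Nat → List String → List String → List String
  | 0, chunks, words => chunks ++ [PySem.Str.join " " words]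
  | fuel + 1, chunks, words =>
    let i := pvFindSplitPoint words avoid
    let chunks' := chunks ++ [PySem.Str.join " " (words.take i)]
    let rest := words.drop i
    if (rest.length : Int) ≤ stop then chunks' ++ [PySem.Str.join " " rest]
    else splitB_go avoid stop fuel chunks' rest

def split_sentence_by_length_alt (sentence : String) (max_length : Int) (flex_length : Int) (avoid_ending_words : Option (List String)) : List String :=
  let avoid := avoid_ending_words.getD pvAvoidDefault
  let words := PySem.Str.split₀ sentence
  if (words.length : Int) ≤ max_length + flex_length then [sentence]
  else splitB_go avoid (max max_length (max_length + flex_length)) (words.length + 1) [] words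

-- ===== PRECONDITION & SPEC =====
-- Pre_ excludes exactly the inputs on which A never returns (it recurses forever, RecursionError):
-- more words than max_length+flex_length while both stop thresholds are below 1.
def Pre_split_sentence_by_length (sentence : String) (max_length : Int) (flex_length : Int) (avoid_ending_words : Option (List String)) : Prop :=
  (((PySem.Str.split₀ sentence).length : Int) ≤ max_length + flex_length) ∨ 1 ≤ max_length ∨ 1 ≤ max_length + flex_length

instance (sentence : String) (max_length : Int) (flex_length : Int) (avoid_ending_words : Option (List String)) : Decidable (Pre_split_sentence_by_length sentence max_length flex_length avoid_ending_words) := by unfold Pre_split_sentence_by_length; infer_instance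

def pvWitness_split_sentence_by_length : String × Int × Int × Option (List String) := ("hello world out there", 1, 0, none)

def Spec_split_sentence_by_length (sentence : String) (max_length : Int) (flex_length : Int) (avoid_ending_words : Option (List String)) (out : List String) : Prop := out = split_sentence_by_length_alt sentence max_length flex_length avoid_ending_words
instance (sentence : String) (max_length : Int) (flex_length : Int) (avoid_ending_words : Option (List String)) (out : List String) : Decidable (Spec_split_sentence_by_length sentence max_length flex_length avoid_ending_words out) := by unfold Spec_split_sentence_by_length; infer_instance

-- ===== CLAIM (what is proved, stated in full; the proofs are below) =====
def Claim_equal_split_sentence_by_length : Prop := ∀ (sentence : String) (max_length : Int) (flex_length : Int) (avoid_ending_words : Option (List String)), Dom_split_sentence_by_length sentence max_length flex_length avoid_ending_words → Pre_split_sentence_by_length sentence max_length flex_length avoid_ending_words → Spec_split_sentence_by_length sentence max_length flex_length avoid_ending_words (split_sentence_by_length sentence max_length flex_length avoid_ending_words)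

-- ===== LEMMAS AND PROOFS =====

-- a word produced by str.split(): nonempty and whitespace-free
def pvGoodC (cs : List Char) : Prop := cs ≠ [] ∧ ∀ c ∈ cs, PySem.Chars.isspace c = false

theorem pvGo_words (s : List Char) : ∀ cur acc, (∀ c ∈ cur, PySem.Chars.isspace c = false) →
    (∀ w ∈ acc, pvGoodC w) → ∀ w ∈ PySem.Chars.split₀.go s cur acc, pvGoodC w := by
  induction s with
  | nil =>
    intro cur acc hcur hacc w hw
    simp only [PySem.Chars.split₀.go] at hw
    split at hw
    · exact hacc w (by simpa using hw)
    · rename_i hne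
      rw [List.mem_reverse, List.mem_cons] at hw
      rcases hw with h | h
      · subst h
        refine ⟨by simpa using (List.isEmpty_eq_false_iff.mp (by simpa using hne)), ?_⟩
        intro c hc; exact hcur c (List.mem_reverse.mp hc)
      · exact hacc _ h
  | cons c rest ih =>
    intro cur acc hcur hacc w hw
    simp only [PySem.Chars.split₀.go] at hw
    split at hw
    · split at hw
      · exact ih [] acc (by simp) hacc w hw
      · rename_i hne
        refine ih [] _ (by simp) ?_ w hw
        intro v hv
        rw [List.mem_cons] at hv
        rcases hv with h | h
        · subst h
          refine ⟨by simpa using (List.isEmpty_eq_false_iff.mp (by simpa using hne)), ?_⟩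
          intro d hd; exact hcur d (List.mem_reverse.mp hd)
        · exact hacc _ h
    · rename_i hsp
      refine ih (c :: cur) acc ?_ hacc w hw
      intro d hd
      rw [List.mem_cons] at hd
      rcases hd with h | h
      · subst h; simpa using hsp
      · exact hcur d h

theorem pvGo_append (w : List Char) (hw : ∀ c ∈ w, PySem.Chars.isspace c = false) :
    ∀ rest cur acc, PySem.Chars.split₀.go (w ++ rest) cur acc
      = PySem.Chars.split₀.go rest (w.reverse ++ cur) acc := by
  induction w with
  | nil => intro rest cur acc; simp
  | cons c cs ih =>
    intro rest cur acc
    have hc : PySem.Chars.isspace c = false := hw c (by simp)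
    simp only [List.cons_append, PySem.Chars.split₀.go, hc]
    rw [ih (fun d hd => hw d (by simp [hd])) rest (c :: cur) acc]
    simp

theorem pvRoundC (ws : List (List Char)) (h : ∀ w ∈ ws, pvGoodC w) : ∀ acc,
    PySem.Chars.split₀.go (PySem.Chars.join [' '] ws) [] acc = acc.reverse ++ ws := by
  induction ws with
  | nil => intro acc; rw [PySem.Chars.join_nil]; simp [PySem.Chars.split₀.go]
  | cons w ws ih =>
    intro acc
    obtain ⟨hne, hsp⟩ := h w (by simp)
    cases ws with
    | nil =>
      rw [show PySem.Chars.join [' '] [w] = w ++ [] by simp [PySem.Chars.join_singleton]]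
      rw [pvGo_append w hsp [] [] acc]
      simp only [PySem.Chars.split₀.go]
      rw [if_neg (by simpa using hne)]
      simp
    | cons v vs =>
      rw [show PySem.Chars.join [' '] (w :: v :: vs) = w ++ (' ' :: PySem.Chars.join [' '] (v :: vs)) by
        simpa using PySem.Chars.join_cons_cons [' '] w v vs]
      rw [pvGo_append w hsp _ [] acc]
      simp only [PySem.Chars.split₀.go]
      rw [if_pos (by decide), if_neg (by simpa using hne)]
      rw [ih (fun u hu => h u (by simp [hu])) ]
      simp

def pvGoodS (w : String) : Prop := pvGoodC w.toList

theorem pvRoundS (ws : List String) (h : ∀ w ∈ ws, pvGoodS w) :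
    PySem.Str.split₀ (PySem.Str.join " " ws) = ws := by
  have h1 : (PySem.Str.join " " ws).toList = PySem.Chars.join [' '] (ws.map String.toList) := by
    simp [PySem.Str.join]
  have h2 : PySem.Chars.split₀ (PySem.Chars.join [' '] (ws.map String.toList)) = ws.map String.toList := by
    have := pvRoundC (ws.map String.toList) (by
      intro w hw; obtain ⟨v, hv, rfl⟩ := List.mem_map.mp hw; exact h v hv) []
    simpa [PySem.Chars.split₀] using this
  simp [PySem.Str.split₀, h1, h2, List.map_map]
  have : List.map (String.ofList ∘ String.toList) ws = List.map id ws :=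
    List.map_congr_left (by intro v hv; simp)
  simpa using this

theorem pvSplitGood (s : String) : ∀ w ∈ PySem.Str.split₀ s, pvGoodS w := by
  intro w hw
  simp only [PySem.Str.split₀, List.mem_map] at hw
  obtain ⟨cs, hcs, rfl⟩ := hw
  have := pvGo_words s.toList [] [] (by simp) (by simp) cs (by simpa [PySem.Chars.split₀] using hcs)
  simpa [pvGoodS] using this

theorem pvFspGo_le (ws avoid : List String) (m : Nat) : pvFspGo ws avoid m ≤ m := by
  induction m with
  | zero => simp [pvFspGo]
  | succ k ih => simp only [pvFspGo]; split <;> omega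

theorem pvFsp_lt (ws avoid : List String) (h : 0 < ws.length) :
    pvFindSplitPoint ws avoid < ws.length := by
  have := pvFspGo_le ws avoid (ws.length / 2)
  simp only [pvFindSplitPoint]
  split <;> omega

theorem pvFsp_pos (ws avoid : List String) (h : 2 ≤ ws.length) :
    1 ≤ pvFindSplitPoint ws avoid := by
  have := pvFspGo_le ws avoid (ws.length / 2)
  simp only [pvFindSplitPoint]
  split <;> omega

theorem pvB_acc (avoid : List String) (stop : Int) (f : Nat) : ∀ chunks ws,
    splitB_go avoid stop f chunks ws = chunks ++ splitB_go avoid stop f [] ws := by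
  induction f with
  | zero => intro chunks ws; simp [splitB_go]
  | succ k ih =>
    intro chunks ws
    simp only [splitB_go, List.nil_append]
    split
    · simp
    · rw [ih, ih [PySem.Str.join " " (List.take (pvFindSplitPoint ws avoid) ws)]]
      simp

theorem pvMain (avoid : List String) (maxL flexL : Int) (hstop : 1 ≤ max maxL (maxL + flexL)) :
    ∀ n ws fA fB, ws.length = n → (∀ w ∈ ws, pvGoodS w) → maxL + flexL < (ws.length : Int) →
    ws.length ≤ fA → ws.length ≤ fB + 1 →
    (if maxL < ((PySem.Str.split₀ (PySem.Str.join " " (ws.drop (pvFindSplitPoint ws avoid)))).length : Int) then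
        PySem.Str.join " " (ws.take (pvFindSplitPoint ws avoid))
          :: splitA_go avoid maxL flexL fA (PySem.Str.join " " (ws.drop (pvFindSplitPoint ws avoid)))
      else [PySem.Str.join " " (ws.take (pvFindSplitPoint ws avoid)),
            PySem.Str.join " " (ws.drop (pvFindSplitPoint ws avoid))])
    = splitB_go avoid (max maxL (maxL + flexL)) (fB + 1) [] ws := by
  intro n
  induction n using Nat.strong_induction_on with
  | _ n ih =>
    intro ws fA fB hlen hgood hlim hA hB
    set i := pvFindSplitPoint ws avoid with hi
    have hgoodr : ∀ w ∈ ws.drop i, pvGoodS w := fun w hw => hgood w (List.mem_of_mem_drop hw)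
    have hround : PySem.Str.split₀ (PySem.Str.join " " (ws.drop i)) = ws.drop i :=
      pvRoundS _ hgoodr
    have hk : (ws.drop i).length = ws.length - i := by simp
    rw [hround]
    simp only [splitB_go, List.nil_append]
    by_cases hc1 : maxL < ((ws.drop i).length : Int)
    · by_cases hc2 : ((ws.drop i).length : Int) ≤ maxL + flexL
      · -- remainder fits within max_length+flex_length: A's recursive call returns it whole
        rw [if_pos hc1, if_pos (le_trans hc2 (le_max_right maxL (maxL + flexL)))]
        have hlen1 : 1 ≤ ws.length := by
          have h0 : (0 : Int) ≤ ((ws.drop i).length : Int) := by positivity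
          omega
        obtain ⟨fA', rfl⟩ : ∃ m, fA = m + 1 := ⟨fA - 1, by omega⟩
        simp only [splitA_go, hround]
        rw [if_pos hc2]
        simp
        exact ⟨rfl, rfl⟩
      · -- remainder still too long on both accounts: recurse / loop again
        push_neg at hc2
        have hcs : max maxL (maxL + flexL) < ((ws.drop i).length : Int) := max_lt hc1 hc2
        have hk2 : 2 ≤ (ws.drop i).length := by omega
        have hilen : 2 ≤ ws.length := by omega
        have hipos : 1 ≤ i := pvFsp_pos ws avoid hilen
        have hilt : i < ws.length := pvFsp_lt ws avoid (by omega)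
        rw [if_pos hc1, if_neg (not_le.mpr hcs)]
        obtain ⟨fA', rfl⟩ : ∃ m, fA = m + 1 := ⟨fA - 1, by omega⟩
        obtain ⟨fB', rfl⟩ : ∃ m, fB = m + 1 := ⟨fB - 1, by omega⟩
        simp only [splitA_go, hround]
        rw [if_neg (not_le.mpr hc2)]
        rw [ih (ws.drop i).length (by omega) (ws.drop i) fA' fB' rfl hgoodr hc2
          (by omega) (by omega)]
        conv_rhs => rw [pvB_acc]
        simp
        exact ⟨rfl, rfl⟩
    · -- remainder already no longer than max_length: both emit it and stop
      push_neg at hc1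
      rw [if_neg (not_lt.mpr hc1), if_pos (le_trans hc1 (le_max_left maxL (maxL + flexL)))]
      simp
      exact ⟨rfl, rfl⟩

-- ===== VERDICT (by name: the statement is the Claim_ definition above) =====
theorem split_sentence_by_length_spec : Claim_equal_split_sentence_by_length := by
  intro s maxL flexL av hdom hpre
  unfold Spec_split_sentence_by_length
  simp only [split_sentence_by_length, split_sentence_by_length_alt]
  by_cases hg : ((PySem.Str.split₀ s).length : Int) ≤ maxL + flexL
  · rw [if_pos hg]
    simp only [splitA_go]
    rw [if_pos hg]
  · have hlim : maxL + flexL < ((PySem.Str.split₀ s).length : Int) := lt_of_not_ge hg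
    have hstop : 1 ≤ max maxL (maxL + flexL) := by
      rcases hpre with h | h | h
      · exact absurd h hg
      · exact le_trans h (le_max_left _ _)
      · exact le_trans h (le_max_right _ _)
    rw [if_neg hg]
    simp only [splitA_go]
    rw [if_neg hg]
    exact pvMain (av.getD pvAvoidDefault) maxL flexL hstop (PySem.Str.split₀ s).length
      (PySem.Str.split₀ s) (PySem.Str.split₀ s).length (PySem.Str.split₀ s).length rfl
      (pvSplitGood s) hlim le_rfl (by omega)
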